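-- pv_equiv track=rewrite | github.com/nikitabolkar123/daily_practice_problems | practice_problmes/string_pblms/sum_vowel_consonents.py | finding_vowel
-- ===== SOURCE A (Python) =====
-- def finding_vowel(input_string):
--     vowel_dict = {'A': 4, 'E': 3, 'I': 1, 'O': 0, 'U': 0}
--     input_string = input_string.upper()
--     sum = 0
--     for i in vowel_dict:
--         for j in input_string:
--             if i == j:
--                 sum = sum + vowel_dict[i]
--     return sum
-- ===== SOURCE B (Python) =====
-- def finding_vowel(input_string):
--     vowel_dict = {'A': 4, 'E': 3, 'I': 1, 'O': 0, 'U': 0}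
--     total = 0
--     for ch in input_string.upper():
--         total += vowel_dict.get(ch, 0)
--     return total
-- ===== Notes on version B (the rewrite author's own statement) =====
-- stated objective: idiomatic
-- what changed: Replaced A's outer loop over the 5 vowels, each rescanning the whole string, by a single pass over the upper-cased string using the dict as a lookup table (vowel_dict.get(ch, 0)).
import Mathlib
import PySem

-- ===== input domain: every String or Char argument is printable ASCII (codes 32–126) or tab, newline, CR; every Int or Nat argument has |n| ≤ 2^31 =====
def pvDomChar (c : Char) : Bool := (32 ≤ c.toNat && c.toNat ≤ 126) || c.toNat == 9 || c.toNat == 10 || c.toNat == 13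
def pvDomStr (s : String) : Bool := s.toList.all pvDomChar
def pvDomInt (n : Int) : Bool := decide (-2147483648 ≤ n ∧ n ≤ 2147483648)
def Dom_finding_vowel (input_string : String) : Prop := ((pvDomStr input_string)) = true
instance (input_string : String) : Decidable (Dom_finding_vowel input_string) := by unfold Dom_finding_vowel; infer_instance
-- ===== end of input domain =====

-- B is the single-pass idiomatic version: one scan of the upper-cased string with a dict lookup,
-- instead of A's loop over the 5 vowels each rescanning the whole string.

def pvVowelDict : PySem.Dict Char Int :=
  PySem.Dict.ofList [('A', 4), ('E', 3), ('I', 1), ('O', 0), ('U', 0)]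

-- ===== PORT A =====
-- outer loop over the dict's keys, inner loop over the upper-cased string
def finding_vowel (input_string : String) : Int :=
  let s := PySem.Str.upper input_string
  pvVowelDict.keys.foldl
    (fun sum i =>
      s.toList.foldl (fun sum j => if i == j then sum + pvVowelDict.getD i 0 else sum) sum)
    0

-- ===== PORT B =====
-- single pass: total += vowel_dict.get(ch, 0)
def finding_vowel_alt (input_string : String) : Int :=
  (PySem.Str.upper input_string).toList.foldl (fun total ch => total + pvVowelDict.getD ch 0) 0

-- ===== PRECONDITION & SPEC =====
def Spec_finding_vowel (input_string : String) (out : Int) : Prop := out = finding_vowel_alt input_string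
instance (input_string : String) (out : Int) : Decidable (Spec_finding_vowel input_string out) := by unfold Spec_finding_vowel; infer_instance

-- ===== CLAIM (what is proved, stated in full; the proofs are below) =====
def Claim_equal_finding_vowel : Prop := ∀ (input_string : String), Dom_finding_vowel input_string → Spec_finding_vowel input_string (finding_vowel input_string)

-- ===== LEMMAS AND PROOFS =====

-- A's inner loop: a foldl accumulating (if i == j then +w) equals acc + a map-sum
theorem pv_inner_foldl (i : Char) (w : Int) (l : List Char) (a : Int) :
    l.foldl (fun sum j => if i == j then sum + w else sum) a
      = a + (l.map (fun j => if i == j then w else 0)).sum := by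
  induction l generalizing a with
  | nil => simp
  | cons x xs ih =>
    simp only [List.foldl_cons, List.map_cons, List.sum_cons, ih]
    split_ifs <;> ring

-- pointwise: the five per-vowel contributions of A sum to B's dict lookup
theorem pv_pointwise (j : Char) :
    (if 'A' == j then (4:Int) else 0) + (if 'E' == j then (3:Int) else 0)
      + (if 'I' == j then (1:Int) else 0) + (if 'O' == j then (0:Int) else 0)
      + (if 'U' == j then (0:Int) else 0) = pvVowelDict.getD j 0 := by
  by_cases hA : j = 'A'; · subst hA; decide
  by_cases hE : j = 'E'; · subst hE; decide
  by_cases hI : j = 'I'; · subst hI; decide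
  by_cases hO : j = 'O'; · subst hO; decide
  by_cases hU : j = 'U'; · subst hU; decide
  have h : pvVowelDict
      = PySem.Dict.mk [('A', 4), ('E', 3), ('I', 1), ('O', 0), ('U', 0)] := by decide
  rw [h, PySem.Dict.getD_eq_get?_getD]
  have hA' : ('A' == j) = false := by simp [Ne.symm hA]
  have hE' : ('E' == j) = false := by simp [Ne.symm hE]
  have hI' : ('I' == j) = false := by simp [Ne.symm hI]
  have hO' : ('O' == j) = false := by simp [Ne.symm hO]
  have hU' : ('U' == j) = false := by simp [Ne.symm hU]
  simp [PySem.Dict.get?, hA', hE', hI', hO', hU']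

theorem finding_vowel_spec : Claim_equal_finding_vowel := by
  intro input_string _
  unfold Spec_finding_vowel finding_vowel finding_vowel_alt
  set l := (PySem.Str.upper input_string).toList with hl
  have hB : l.foldl (fun total ch => total + pvVowelDict.getD ch 0) 0
      = 0 + (l.map (fun ch => pvVowelDict.getD ch 0)).sum :=
    PySem.List.foldl_add _ _ _
  have hkeys : pvVowelDict.keys = ['A', 'E', 'I', 'O', 'U'] := by decide
  simp only [hkeys, List.foldl_cons, List.foldl_nil, pv_inner_foldl, hB]
  have hmap : (l.map (fun ch => pvVowelDict.getD ch 0)).sum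
      = (l.map (fun j => if 'A' == j then (4:Int) else 0)).sum
        + (l.map (fun j => if 'E' == j then (3:Int) else 0)).sum
        + (l.map (fun j => if 'I' == j then (1:Int) else 0)).sum
        + (l.map (fun j => if 'O' == j then (0:Int) else 0)).sum
        + (l.map (fun j => if 'U' == j then (0:Int) else 0)).sum := by
    induction l with
    | nil => simp
    | cons x xs ih =>
      simp only [List.map_cons, List.sum_cons, ih, ← pv_pointwise x]
      ring
  rw [hmap]
  have hg4 : pvVowelDict.getD 'A' 0 = 4 := by decide
  have hg3 : pvVowelDict.getD 'E' 0 = 3 := by decide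
  have hg1 : pvVowelDict.getD 'I' 0 = 1 := by decide
  have hgO : pvVowelDict.getD 'O' 0 = 0 := by decide
  have hgU : pvVowelDict.getD 'U' 0 = 0 := by decide
  rw [hg4, hg3, hg1, hgO, hgU]
  ring
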